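-- pv_equiv track=rewrite | github.com/pearlq12345/RoboClaw | roboclaw/http/explorer.py | summarize_files
-- ===== SOURCE A (Python) =====
-- from typing import Any
--
-- def summarize_files(siblings: list[dict[str, Any]]) -> dict[str, Any]:
--     filenames = [item.get("rfilename", "") for item in siblings if item.get("rfilename")]
--     meta_files = sum(1 for name in filenames if name.startswith("meta/"))
--     non_meta = [name for name in filenames if not name.startswith("meta/")]
--     parquet_files = sum(1 for name in non_meta if name.endswith(".parquet"))
--     video_files = sum(1 for name in non_meta if name.endswith(".mp4"))
--     other_files = len(non_meta) - parquet_files - video_files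
--     return {
--         "total_files": len(filenames),
--         "parquet_files": parquet_files,
--         "video_files": video_files,
--         "meta_files": meta_files,
--         "other_files": other_files,
--     }
-- ===== SOURCE B (Python) =====
-- from typing import Any
--
-- def summarize_files(siblings: list[dict[str, Any]]) -> dict[str, Any]:
--     total = parquet = video = meta = other = 0
--     for item in siblings:
--         name = item.get("rfilename", "")
--         if not name:
--             continue
--         total += 1
--         if name.startswith("meta/"):
--             meta += 1
--         elif name.endswith(".parquet"):
--             parquet += 1
--         elif name.endswith(".mp4"):
--             video += 1
--         else:
--             other += 1
--     return {
--         "total_files": total,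
--         "parquet_files": parquet,
--         "video_files": video,
--         "meta_files": meta,
--         "other_files": other,
--     }
-- ===== Notes on version B (the rewrite author's own statement) =====
-- stated objective: simpler
-- what changed: Replaces A's four separate filtered scans plus a subtraction with one pass maintaining five counters and a priority chain.
import Mathlib
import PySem

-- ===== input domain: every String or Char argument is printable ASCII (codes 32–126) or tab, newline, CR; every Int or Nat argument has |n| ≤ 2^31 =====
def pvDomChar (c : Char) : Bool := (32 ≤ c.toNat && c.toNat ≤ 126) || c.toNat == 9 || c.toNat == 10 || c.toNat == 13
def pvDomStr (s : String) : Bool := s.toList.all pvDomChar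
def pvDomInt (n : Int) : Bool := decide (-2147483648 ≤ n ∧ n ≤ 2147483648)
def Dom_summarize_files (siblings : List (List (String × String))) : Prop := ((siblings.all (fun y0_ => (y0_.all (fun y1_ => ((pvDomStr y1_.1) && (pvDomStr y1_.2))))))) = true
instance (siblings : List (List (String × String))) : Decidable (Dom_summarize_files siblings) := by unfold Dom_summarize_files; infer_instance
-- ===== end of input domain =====

-- ===== PORT A =====
-- B changes decomposition only: one counting pass instead of A's four filtered scans; same values.
def summarize_files (siblings : List (List (String × String))) : List (String × Int) :=
  let filenames := (siblings.filter
      (fun item => PySem.Dict.getD (PySem.Dict.mk item) "rfilename" "" ≠ "")).map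
      (fun item => PySem.Dict.getD (PySem.Dict.mk item) "rfilename" "")
  let meta_files : Int := filenames.countP (fun name => PySem.Str.startswith name "meta/")
  let non_meta := filenames.filter (fun name => !(PySem.Str.startswith name "meta/"))
  let parquet_files : Int := non_meta.countP (fun name => PySem.Str.endswith name ".parquet")
  let video_files : Int := non_meta.countP (fun name => PySem.Str.endswith name ".mp4")
  let other_files : Int := (non_meta.length : Int) - parquet_files - video_files
  [("total_files", (filenames.length : Int)),
   ("parquet_files", parquet_files),
   ("video_files", video_files),
   ("meta_files", meta_files),
   ("other_files", other_files)]

-- ===== PORT B =====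
def summarizeStep (st : Int × Int × Int × Int × Int) (item : List (String × String)) :
    Int × Int × Int × Int × Int :=
  let name := PySem.Dict.getD (PySem.Dict.mk item) "rfilename" ""
  if name = "" then st
  else
    let (t, p, v, m, o) := st
    if PySem.Str.startswith name "meta/" then (t + 1, p, v, m + 1, o)
    else if PySem.Str.endswith name ".parquet" then (t + 1, p + 1, v, m, o)
    else if PySem.Str.endswith name ".mp4" then (t + 1, p, v + 1, m, o)
    else (t + 1, p, v, m, o + 1)

def summarize_files_alt (siblings : List (List (String × String))) : List (String × Int) :=
  let (t, p, v, m, o) := siblings.foldl summarizeStep (0, 0, 0, 0, 0)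
  [("total_files", t), ("parquet_files", p), ("video_files", v),
   ("meta_files", m), ("other_files", o)]

-- ===== PRECONDITION & SPEC =====
def Spec_summarize_files (siblings : List (List (String × String))) (out : List (String × Int)) : Prop := out = summarize_files_alt siblings
instance (siblings : List (List (String × String))) (out : List (String × Int)) : Decidable (Spec_summarize_files siblings out) := by unfold Spec_summarize_files; infer_instance

-- ===== CLAIM (what is proved, stated in full; the proofs are below) =====
def Claim_equal_summarize_files : Prop := ∀ (siblings : List (List (String × String))), Dom_summarize_files siblings → Spec_summarize_files siblings (summarize_files siblings)

-- ===== LEMMAS AND PROOFS =====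

lemma countP_split (l : List String) (q r : String → Bool) :
    (l.countP q : Int) = l.countP (fun x => q x && r x) + l.countP (fun x => q x && !(r x)) := by
  induction l with
  | nil => simp
  | cons a l ih =>
    by_cases hq : q a
    · by_cases hr : r a <;> simp [hq, hr, ih] <;> omega
    · simp [hq, ih]

lemma countP_len (l : List String) (q : String → Bool) :
    (l.length : Int) = l.countP q + l.countP (fun x => !(q x)) := by
  induction l with
  | nil => simp
  | cons a l ih => by_cases hq : q a <;> simp [hq, ih] <;> omega

lemma summarizeStep_loop (siblings : List (List (String × String)))
    (t p v m o : Int) :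
    siblings.foldl summarizeStep (t, p, v, m, o) =
      (let filenames := (siblings.filter
          (fun item => PySem.Dict.getD (PySem.Dict.mk item) "rfilename" "" ≠ "")).map
          (fun item => PySem.Dict.getD (PySem.Dict.mk item) "rfilename" "")
       let mc : Int := filenames.countP (fun name => PySem.Str.startswith name "meta/")
       let nm := filenames.filter (fun name => !(PySem.Str.startswith name "meta/"))
       let pc : Int := nm.countP (fun name => PySem.Str.endswith name ".parquet")
       let vc : Int := nm.countP (fun name =>
          !(PySem.Str.endswith name ".parquet") && PySem.Str.endswith name ".mp4")
       let oc : Int := nm.countP (fun name =>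
          !(PySem.Str.endswith name ".parquet") && !(PySem.Str.endswith name ".mp4"))
       (t + filenames.length, p + pc, v + vc, m + mc, o + oc)) := by
  induction siblings generalizing t p v m o with
  | nil => simp
  | cons item rest ih =>
    simp only [List.foldl_cons, summarizeStep]
    by_cases hn : PySem.Dict.getD (PySem.Dict.mk item) "rfilename" "" = ""
    · simp [hn, ih]
    · by_cases hm : PySem.Str.startswith
          (PySem.Dict.getD (PySem.Dict.mk item) "rfilename" "") "meta/" = true
      · simp at hm
        simp [hn, hm, ih]; omega
      · by_cases hp : PySem.Str.endswith
            (PySem.Dict.getD (PySem.Dict.mk item) "rfilename" "") ".parquet" = true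
        · simp at hm hp
          simp [hn, hm, hp, ih]; omega
        · by_cases hv : PySem.Str.endswith
              (PySem.Dict.getD (PySem.Dict.mk item) "rfilename" "") ".mp4" = true
          · simp at hm hp hv
            simp [hn, hm, hp, hv, ih]; omega
          · simp at hm hp hv
            simp [hn, hm, hp, hv, ih]; omega

lemma parquet_mp4_disjoint (s : String) :
    PySem.Str.endswith s ".parquet" = true → PySem.Str.endswith s ".mp4" = false := by
  intro hp
  by_contra hv
  rw [Bool.not_eq_false] at hv
  rw [PySem.Str.endswith_eq, PySem.Chars.endswith_iff] at hp hv
  rcases List.suffix_or_suffix_of_suffix hv hp with h | h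
  · revert h; decide
  · have := h.length_le; revert this; decide

-- ===== VERDICT (by name: the statement is the Claim_ definition above) =====
theorem summarize_files_spec : Claim_equal_summarize_files := by
  unfold Claim_equal_summarize_files
  intro siblings _
  show summarize_files siblings = summarize_files_alt siblings
  simp only [summarize_files, summarize_files_alt, summarizeStep_loop, zero_add]
  set nm := ((siblings.filter
      (fun item => PySem.Dict.getD (PySem.Dict.mk item) "rfilename" "" ≠ "")).map
      (fun item => PySem.Dict.getD (PySem.Dict.mk item) "rfilename" "")).filter
      (fun name => !(PySem.Str.startswith name "meta/")) with hnm
  have hv : (nm.countP (fun name => PySem.Str.endswith name ".mp4") : Int)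
      = nm.countP (fun name =>
          !(PySem.Str.endswith name ".parquet") && PySem.Str.endswith name ".mp4") := by
    congr 1
    apply List.countP_congr
    intro x _
    by_cases h : PySem.Str.endswith x ".parquet" = true
    · rw [parquet_mp4_disjoint x h]; simp
    · rw [Bool.not_eq_true] at h; rw [h]; simp
  have hlen : (nm.length : Int)
      = nm.countP (fun name => PySem.Str.endswith name ".parquet")
        + nm.countP (fun name => !(PySem.Str.endswith name ".parquet")) :=
    countP_len nm _
  have hsplit : (nm.countP (fun name => !(PySem.Str.endswith name ".parquet")) : Int)
      = nm.countP (fun name =>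
          !(PySem.Str.endswith name ".parquet") && PySem.Str.endswith name ".mp4")
        + nm.countP (fun name =>
          !(PySem.Str.endswith name ".parquet") && !(PySem.Str.endswith name ".mp4")) :=
    countP_split nm _ _
  simp only [List.cons.injEq, Prod.mk.injEq, and_true, true_and]
  refine ⟨hv, ?_⟩
  omega
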